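-- pv_equiv track=rewrite | github.com/16arpi/wikilink | scripts/SecondDumpCleaning.py | iter_link_spans
-- ===== SOURCE A (Python) =====
-- def iter_link_spans(text: str):
--     """
--     Yield (span_start, span_end_excl, inner) for each [[...]] block (best-effort).
--     """
--     i = 0
--     while True:
--         a = text.find("[[", i)
--         if a < 0:
--             return
--         b = text.find("]]", a + 2)
--         if b < 0:
--             return
--         inner = text[a + 2: b]
--         yield a, b + 2, inner
--         i = b + 2
-- ===== SOURCE B (Python) =====
-- def iter_link_spans(text: str):
--     """
--     Yield (span_start, span_end_excl, inner) for each [[...]] block (best-effort).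
--     Single left-to-right character scan with an outside/inside state, no find().
--     """
--     n = len(text)
--     i = 0
--     start = -1          # -1: outside a block; otherwise index of the opening '[['
--     buf = []
--     while i < n:
--         if start < 0:
--             if text[i] == '[' and i + 1 < n and text[i + 1] == '[':
--                 start = i
--                 buf = []
--                 i += 2
--             else:
--                 i += 1
--         else:
--             if text[i] == ']' and i + 1 < n and text[i + 1] == ']':
--                 yield start, i + 2, "".join(buf)
--                 start = -1
--                 i += 2
--             else:
--                 buf.append(text[i])
--                 i += 1
-- ===== Notes on version B (the rewrite author's own statement) =====
-- stated objective: alternative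
-- what changed: Replaced the find-driven index loop (two substring searches per block plus slicing) with a single left-to-right character scan that keeps an outside/inside state and accumulates the inner text as it goes.
import Mathlib
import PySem

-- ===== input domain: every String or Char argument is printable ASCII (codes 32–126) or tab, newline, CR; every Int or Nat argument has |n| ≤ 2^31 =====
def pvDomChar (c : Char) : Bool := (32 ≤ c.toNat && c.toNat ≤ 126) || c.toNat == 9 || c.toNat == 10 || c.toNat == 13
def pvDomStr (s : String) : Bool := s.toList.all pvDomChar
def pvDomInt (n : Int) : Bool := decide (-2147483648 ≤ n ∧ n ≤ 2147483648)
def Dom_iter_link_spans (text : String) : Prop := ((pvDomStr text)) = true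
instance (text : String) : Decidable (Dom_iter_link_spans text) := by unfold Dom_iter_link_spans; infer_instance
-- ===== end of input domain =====

-- B replaces A's find-driven index loop with a single character scan keeping an outside/inside state (alternative decomposition, same cost).

-- ===== PORT A =====
-- A's while-loop: i advances past each found block; fuel (length+1) only makes the
-- recursion total — the proof shows it never runs out on the initial call.
def pvAgo (cs : List Char) (i : Int) : Nat → List (Int × Int × String)
  | 0 => []
  | fuel + 1 =>
    let a := PySem.Chars.findFrom cs ['[', '['] i
    if a < 0 then []
    else
      let b := PySem.Chars.findFrom cs [']', ']'] (a + 2)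
      if b < 0 then []
      else (a, b + 2, String.mk (PySem.List.slice cs (some (a + 2)) (some b))) ::
            pvAgo cs (b + 2) fuel

def iter_link_spans (text : String) : List (Int × Int × String) :=
  pvAgo text.toList 0 (text.toList.length + 1)

-- ===== PORT B =====
-- B's single pass: scanOut = outside a block, scanIn = inside (start position s, buffer acc).
mutual
def scanOut : List Char → Int → List (Int × Int × String)
  | [], _ => []
  | c :: rest, i =>
    if c = '[' ∧ rest.head? = some '[' then scanIn rest.tail (i + 2) i []
    else scanOut rest (i + 1)
termination_by cs _ => cs.length
decreasing_by all_goals simp [List.length_tail]; try omega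
def scanIn : List Char → Int → Int → List Char → List (Int × Int × String)
  | [], _, _, _ => []
  | c :: rest, i, s, acc =>
    if c = ']' ∧ rest.head? = some ']' then
      (s, i + 2, String.mk acc.reverse) :: scanOut rest.tail (i + 2)
    else scanIn rest (i + 1) s (c :: acc)
termination_by cs _ _ _ => cs.length
decreasing_by all_goals simp [List.length_tail]; try omega
end

def iter_link_spans_alt (text : String) : List (Int × Int × String) :=
  scanOut text.toList 0

-- ===== PRECONDITION & SPEC =====
def Spec_iter_link_spans (text : String) (out : List (Int × Int × String)) : Prop := out = iter_link_spans_alt text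
instance (text : String) (out : List (Int × Int × String)) : Decidable (Spec_iter_link_spans text out) := by unfold Spec_iter_link_spans; infer_instance

-- ===== CLAIM (what is proved, stated in full; the proofs are below) =====
def Claim_equal_iter_link_spans : Prop := ∀ (text : String), Dom_iter_link_spans text → Spec_iter_link_spans text (iter_link_spans text)

-- ===== LEMMAS AND PROOFS =====

lemma two_prefix_iff (x c : Char) (rest : List Char) :
    ([x, x] <+: c :: rest) ↔ (c = x ∧ rest.head? = some x) := by
  cases rest with
  | nil => simp [List.cons_prefix_cons]
  | cons d t => simp [List.cons_prefix_cons, eq_comm]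

lemma scanOut_of_no (cs : List Char) (i : Int) (h : ¬ ['[', '['] <:+: cs) :
    scanOut cs i = [] := by
  induction cs generalizing i with
  | nil => simp [scanOut]
  | cons c rest ih =>
    rw [scanOut]
    have hc : ¬ (c = '[' ∧ rest.head? = some '[') := by
      intro hp
      exact h (((two_prefix_iff '[' c rest).2 hp).isInfix)
    rw [if_neg hc]
    exact ih _ (fun hi => h (List.infix_cons hi))

lemma scanIn_of_no (cs : List Char) (i s : Int) (acc : List Char)
    (h : ¬ [']', ']'] <:+: cs) : scanIn cs i s acc = [] := by
  induction cs generalizing i acc with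
  | nil => simp [scanIn]
  | cons c rest ih =>
    rw [scanIn]
    have hc : ¬ (c = ']' ∧ rest.head? = some ']') := by
      intro hp
      exact h (((two_prefix_iff ']' c rest).2 hp).isInfix)
    rw [if_neg hc]
    exact ih _ _ (fun hi => h (List.infix_cons hi))

lemma scanOut_found (k : Nat) : ∀ (cs : List Char) (i : Int),
    (['[', '['] <+: cs.drop k) → (∀ j < k, ¬ ['[', '['] <+: cs.drop j) →
    scanOut cs i = scanIn (cs.drop (k + 2)) (i + k + 2) (i + k) [] := by
  induction k with
  | zero =>
    intro cs i h1 _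
    simp only [List.drop_zero] at h1
    obtain ⟨t, rfl⟩ := h1
    simp only [List.cons_append, List.nil_append]
    rw [scanOut]
    simp
  | succ k ih =>
    intro cs i h1 h2
    cases cs with
    | nil => simp at h1
    | cons c rest =>
      rw [scanOut]
      have hc : ¬ (c = '[' ∧ rest.head? = some '[') := by
        intro hp
        exact h2 0 (by omega) (by simpa using (two_prefix_iff '[' c rest).2 hp)
      rw [if_neg hc]
      have := ih rest (i + 1) (by simpa using h1)
        (fun j hj => by simpa using h2 (j + 1) (by omega))
      rw [this]
      have harg : (i + 1) + (k : Int) + 2 = i + ((k : Nat) + 1 : Nat) + 2 := by push_cast; ring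
      have harg2 : (i + 1) + (k : Int) = i + ((k : Nat) + 1 : Nat) := by push_cast; ring
      rw [harg, harg2]
      rfl

lemma scanIn_found (m : Nat) : ∀ (cs : List Char) (i s : Int) (acc : List Char),
    ([']', ']'] <+: cs.drop m) → (∀ j < m, ¬ [']', ']'] <+: cs.drop j) →
    scanIn cs i s acc =
      (s, i + m + 2, String.mk (acc.reverse ++ cs.take m)) ::
        scanOut (cs.drop (m + 2)) (i + m + 2) := by
  induction m with
  | zero =>
    intro cs i s acc h1 _
    simp only [List.drop_zero] at h1
    obtain ⟨t, rfl⟩ := h1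
    simp only [List.cons_append, List.nil_append]
    rw [scanIn]
    simp
  | succ m ih =>
    intro cs i s acc h1 h2
    cases cs with
    | nil => simp at h1
    | cons c rest =>
      rw [scanIn]
      have hc : ¬ (c = ']' ∧ rest.head? = some ']') := by
        intro hp
        exact h2 0 (by omega) (by simpa using (two_prefix_iff ']' c rest).2 hp)
      rw [if_neg hc]
      have := ih rest (i + 1) s (c :: acc) (by simpa using h1)
        (fun j hj => by simpa using h2 (j + 1) (by omega))
      rw [this]
      have harg : (i + 1) + (m : Int) + 2 = i + ((m : Nat) + 1 : Nat) + 2 := by push_cast; ring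
      rw [harg]
      simp [List.take_succ_cons]

lemma pvAgo_eq_scanOut (fuel : Nat) : ∀ (cs : List Char) (i : Nat),
    i ≤ cs.length → cs.length - i < fuel →
    pvAgo cs (i : Int) fuel = scanOut (cs.drop i) (i : Int) := by
  induction fuel with
  | zero => intro cs i _ h; omega
  | succ fuel ih =>
    intro cs i hi hfuel
    rw [pvAgo]
    rw [PySem.Chars.findFrom_natCast cs ['[', '['] i hi]
    by_cases hfa : PySem.Chars.find (cs.drop i) ['[', '['] = -1
    · rw [if_pos hfa, if_pos (by norm_num : (-1 : Int) < 0)]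
      rw [scanOut_of_no _ _ ((PySem.Chars.find_eq_neg_one_iff _ _).1 hfa)]
    · have hnn : 0 ≤ PySem.Chars.find (cs.drop i) ['[', '['] := by
        have := PySem.Chars.neg_one_le_find (cs.drop i) ['[', '[']
        omega
      set f := PySem.Chars.find (cs.drop i) ['[', '['] with hf
      set k := f.toNat with hk
      have hfk : f = (k : Int) := by omega
      obtain ⟨hpre, hmin⟩ := PySem.Chars.find_spec hnn
      rw [← hf] at hpre hmin
      have hklen : k + 2 ≤ (cs.drop i).length := by
        have h := hpre.length_le
        simp [List.length_drop] at h ⊢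
        omega
      have hilen : i + k + 2 ≤ cs.length := by
        simp [List.length_drop] at hklen; omega
      rw [if_neg hfa, if_neg (by omega : ¬ (i : Int) + f < 0)]
      have hcast : (i : Int) + f + 2 = ((i + k + 2 : Nat) : Int) := by push_cast; omega
      rw [hcast]
      rw [PySem.Chars.findFrom_natCast cs [']', ']'] (i + k + 2) hilen]
      have hdd : (cs.drop i).drop (k + 2) = cs.drop (i + k + 2) := by
        rw [List.drop_drop]; congr 1
      have houtfound : scanOut (cs.drop i) (i : Int) =
          scanIn (cs.drop (i + k + 2)) ((i : Int) + k + 2) ((i : Int) + k) [] := by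
        rw [scanOut_found k (cs.drop i) (i : Int) hpre
          (fun j hj => hmin j (by omega))]
        rw [hdd]
      by_cases hfb : PySem.Chars.find (cs.drop (i + k + 2)) [']', ']'] = -1
      · rw [if_pos hfb, if_pos (by norm_num : (-1 : Int) < 0)]
        rw [houtfound, scanIn_of_no _ _ _ _ ((PySem.Chars.find_eq_neg_one_iff _ _).1 hfb)]
      · have hnn2 : 0 ≤ PySem.Chars.find (cs.drop (i + k + 2)) [']', ']'] := by
          have := PySem.Chars.neg_one_le_find (cs.drop (i + k + 2)) [']', ']']
          omega
        set g := PySem.Chars.find (cs.drop (i + k + 2)) [']', ']'] with hg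
        set m := g.toNat with hm
        have hgm : g = (m : Int) := by omega
        obtain ⟨hpre2, hmin2⟩ := PySem.Chars.find_spec hnn2
        rw [← hg] at hpre2 hmin2
        have hmlen : m + 2 ≤ (cs.drop (i + k + 2)).length := by
          have h := hpre2.length_le
          simp [List.length_drop] at h ⊢
          omega
        have hilen2 : i + k + 2 + m + 2 ≤ cs.length := by
          simp [List.length_drop] at hmlen; omega
        rw [if_neg hfb, if_neg (by omega : ¬ ((i + k + 2 : Nat) : Int) + g < 0)]
        -- the recursive call
        have hcast2 : ((i + k + 2 : Nat) : Int) + g + 2 = ((i + k + 2 + m + 2 : Nat) : Int) := by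
          push_cast; omega
        rw [hcast2]
        rw [ih cs (i + k + 2 + m + 2) hilen2 (by omega)]
        -- the slice
        have hslice : PySem.List.slice cs (some (((i + k + 2 : Nat) : Int)))
            (some (((i + k + 2 : Nat) : Int) + g)) = (cs.drop (i + k + 2)).take m := by
          rw [hgm]
          have : ((i + k + 2 : Nat) : Int) + (m : Int) = ((i + k + 2 + m : Nat) : Int) := by
            push_cast; ring
          rw [this, PySem.List.slice_natCast]
          congr 1
          omega
        rw [hslice]
        -- the B side
        rw [houtfound]
        rw [scanIn_found m (cs.drop (i + k + 2)) ((i : Int) + k + 2) ((i : Int) + k) []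
          hpre2 (fun j hj => hmin2 j (by omega))]
        rw [List.drop_drop]
        have e1 : ((i : Int) + k + 2) + m + 2 = ((i + k + 2 + m + 2 : Nat) : Int) := by
          push_cast; ring
        rw [e1]
        rw [show i + k + 2 + (m + 2) = i + k + 2 + m + 2 from by omega]
        rw [hfk]
        simp

-- ===== VERDICT (by name: the statement is the Claim_ definition above) =====
theorem iter_link_spans_spec : Claim_equal_iter_link_spans := by
  intro text _
  unfold Spec_iter_link_spans iter_link_spans iter_link_spans_alt
  have := pvAgo_eq_scanOut (text.toList.length + 1) text.toList 0 (by omega) (by omega)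
  simpa using this
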